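-- pv_equiv track=rewrite | github.com/imranme/Phitron-with-python | practice_problem/f_equation.py | calculate_equation_result
-- ===== SOURCE A (Python) =====
-- def power(X, N):
--     result = 1
--     for _ in range(N):
--         result *= X
--     return result
--
-- def calculate_equation_result(X, N):
--     result = 0
--
--     for i in range(N + 1):
--         if i % 2 == 0:
--             if i == 0:
--                 result += power(X, i) - 1
--             else:
--                 result += power(X, i)
--
--     return result
-- ===== SOURCE B (Python) =====
-- def calculate_equation_result(X, N):
--     # Horner evaluation of X^2 + X^4 + ... + X^(2*(N//2)):
--     # acc after m steps is sum_{k=1}^{m} X^(2k); N//2 steps needed.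
--     acc = 0
--     for _ in range(N // 2):
--         acc = X * X * (1 + acc)
--     return acc
-- ===== Notes on version B (the rewrite author's own statement) =====
-- stated objective: faster
-- what changed: Replaced the O(N^2) loop that recomputes power(X,i) from scratch for each even i by a single Horner-style loop running N//2 times with acc = X*X*(1+acc).
import Mathlib
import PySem

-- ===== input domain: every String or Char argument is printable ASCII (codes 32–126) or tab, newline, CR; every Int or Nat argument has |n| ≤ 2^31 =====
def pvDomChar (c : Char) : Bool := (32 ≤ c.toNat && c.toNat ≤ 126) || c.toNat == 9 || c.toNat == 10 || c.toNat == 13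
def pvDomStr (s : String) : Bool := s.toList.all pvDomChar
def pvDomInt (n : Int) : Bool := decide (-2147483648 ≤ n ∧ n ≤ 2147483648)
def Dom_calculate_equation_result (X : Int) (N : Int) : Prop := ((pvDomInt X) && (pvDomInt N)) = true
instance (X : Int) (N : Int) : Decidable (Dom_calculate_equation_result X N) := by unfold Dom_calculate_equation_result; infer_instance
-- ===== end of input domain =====

-- B replaces A's quadratic "recompute power(X, i) for each even i" loop by a single
-- Horner-style loop running N//2 times (acc = X*X*(1+acc)); faster (asymptotic).

-- ===== PORT A =====
def pvPower (X : Int) (N : Int) : Int :=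
  (PySem.List.pyRange 0 N 1).foldl (fun result _ => result * X) 1

def calculate_equation_result (X : Int) (N : Int) : Int :=
  (PySem.List.pyRange 0 (N + 1) 1).foldl
    (fun result i =>
      if PySem.Int.mod i 2 == 0 then
        if i == 0 then result + (pvPower X i - 1)
        else result + pvPower X i
      else result)
    0

-- ===== PORT B =====
def calculate_equation_result_alt (X : Int) (N : Int) : Int :=
  (PySem.List.pyRange 0 (PySem.Int.floordiv N 2) 1).foldl
    (fun acc _ => X * X * (1 + acc)) 0

-- ===== PRECONDITION & SPEC =====
def Spec_calculate_equation_result (X : Int) (N : Int) (out : Int) : Prop := out = calculate_equation_result_alt X N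
instance (X : Int) (N : Int) (out : Int) : Decidable (Spec_calculate_equation_result X N out) := by unfold Spec_calculate_equation_result; infer_instance

-- ===== CLAIM (what is proved, stated in full; the proofs are below) =====
def Claim_equal_calculate_equation_result : Prop := ∀ (X : Int) (N : Int), Dom_calculate_equation_result X N → Spec_calculate_equation_result X N (calculate_equation_result X N)

-- ===== LEMMAS AND PROOFS =====

-- the Horner accumulator after m iterations
def gHorner (X : Int) : Nat → Int
  | 0 => 0
  | m + 1 => X * X * (1 + gHorner X m)

theorem pvPower_natCast (X : Int) (n : Nat) : pvPower X (n : Int) = X ^ n := by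
  induction n with
  | zero => simp [pvPower]
  | succ k ih =>
    have h : PySem.List.pyRange 0 ((k : Int) + 1) 1
        = PySem.List.pyRange 0 (k : Int) 1 ++ [(k : Int)] :=
      PySem.List.pyRange_one_succ_right (by positivity)
    unfold pvPower at ih ⊢
    push_cast
    rw [h, List.foldl_append, ih]
    simp [pow_succ]

theorem gHorner_succ (X : Int) (m : Nat) :
    gHorner X (m + 1) = gHorner X m + X ^ (2 * (m + 1)) := by
  induction m with
  | zero => simp [gHorner]; ring
  | succ k ih =>
    calc gHorner X (k + 2) = X * X * (1 + gHorner X (k + 1)) := rfl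
      _ = X * X * (1 + (gHorner X k + X ^ (2 * (k + 1)))) := by rw [ih]
      _ = X * X * (1 + gHorner X k) + X ^ (2 * (k + 2)) := by ring
      _ = gHorner X (k + 1) + X ^ (2 * (k + 2)) := rfl

theorem A_nat (X : Int) (n : Nat) :
    calculate_equation_result X (n : Int) = gHorner X (n / 2) := by
  induction n with
  | zero =>
    simp [calculate_equation_result, gHorner,
      PySem.Int.mod, pvPower, PySem.List.pyRange_zero]
  | succ k ih =>
    unfold calculate_equation_result at ih ⊢
    have h : PySem.List.pyRange 0 ((k : Int) + 1 + 1) 1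
        = PySem.List.pyRange 0 ((k : Int) + 1) 1 ++ [(k : Int) + 1] :=
      PySem.List.pyRange_one_succ_right (by positivity)
    push_cast
    rw [h, List.foldl_append, ih]
    simp only [List.foldl_cons, List.foldl_nil]
    have hmod : PySem.Int.mod ((k : Int) + 1) 2 = (((k + 1) % 2 : Nat) : Int) := by
      exact_mod_cast PySem.Int.mod_natCast (k + 1) 2
    rcases Nat.even_or_odd (k + 1) with he | ho
    · -- k+1 even: the term X^(k+1) is added
      have h2 : (k + 1) % 2 = 0 := Nat.even_iff.mp he
      have hne : ((k : Int) + 1 == 0) = false := by simp; omega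
      have hp : pvPower X ((k : Int) + 1) = X ^ (k + 1) := by
        exact_mod_cast pvPower_natCast X (k + 1)
      have hdiv : (k + 1) / 2 = k / 2 + 1 := by omega
      have h21 : 2 * (k / 2 + 1) = k + 1 := by omega
      simp only [hmod, h2, hne, Nat.cast_zero, beq_self_eq_true, if_true, hp]
      rw [if_neg (by simp), hdiv, gHorner_succ, h21]
    · -- k+1 odd: nothing is added
      have h2 : (k + 1) % 2 = 1 := Nat.odd_iff.mp ho
      have hdiv : (k + 1) / 2 = k / 2 := by omega
      rw [hmod, h2, hdiv]
      simp

theorem B_nat (X : Int) (m : Nat) :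
    (PySem.List.pyRange 0 (m : Int) 1).foldl (fun acc _ => X * X * (1 + acc)) 0
      = gHorner X m := by
  induction m with
  | zero => simp [gHorner]
  | succ k ih =>
    have h : PySem.List.pyRange 0 ((k : Int) + 1) 1
        = PySem.List.pyRange 0 (k : Int) 1 ++ [(k : Int)] :=
      PySem.List.pyRange_one_succ_right (by positivity)
    push_cast
    rw [h, List.foldl_append, ih]
    simp [gHorner]

-- ===== VERDICT (by name: the statement is the Claim_ definition above) =====
theorem calculate_equation_result_spec : Claim_equal_calculate_equation_result := by
  intro X N _
  unfold Spec_calculate_equation_result calculate_equation_result_alt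
  rcases Int.lt_or_le N 0 with hneg | hpos
  · -- both loops are empty
    have hA : PySem.List.pyRange 0 (N + 1) 1 = [] :=
      PySem.List.pyRange_one_eq_nil (by omega)
    have hd : PySem.Int.floordiv N 2 ≤ 0 := by
      rw [PySem.Int.floordiv_eq_ediv_of_pos (by norm_num)]; omega
    have hB : PySem.List.pyRange 0 (PySem.Int.floordiv N 2) 1 = [] :=
      PySem.List.pyRange_one_eq_nil hd
    rw [calculate_equation_result, hA, hB]; rfl
  · obtain ⟨n, rfl⟩ := Int.eq_ofNat_of_zero_le hpos
    have hfd : PySem.Int.floordiv (n : Int) 2 = ((n / 2 : Nat) : Int) := by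
      exact_mod_cast PySem.Int.floordiv_natCast n 2
    rw [A_nat, hfd, B_nat]
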